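-- pv_equiv track=rewrite | github.com/cormackikkert/Contests | Google/2020 Codejam Qual/test.py | col_dupe
-- ===== SOURCE A (Python) =====
-- def col_dupe(grid):
--     n = len(grid[0])
--     count = 0
--     check = []
--     for i in range(n):
--         check = []
--         for j in range(n):
--             if grid[j][i] in check:
--                 count += 1
--                 check = []
--                 break
--             elif grid[j][i] not in check:
--                 check.append(grid[j][i])
--     return count
-- ===== SOURCE B (Python) =====
-- def col_dupe(grid):
--     n = len(grid[0])
--     count = 0
--     for i in range(n):
--         col = [grid[j][i] for j in range(n)]
--         if len(set(col)) != len(col):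
--             count += 1
--     return count
-- ===== Notes on version B (the rewrite author's own statement) =====
-- stated objective: simpler
-- what changed: Each column is materialised once and tested for a duplicate by comparing len(set(col)) with len(col), removing A's incremental membership list with its scan-until-repeat inner loop and break/reset control flow.
-- outside the precondition, e.g. on col_dupe([[1, 1, 1], [1, 1, 1], [1]]): A returns 3, B raises IndexError
import Mathlib
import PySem

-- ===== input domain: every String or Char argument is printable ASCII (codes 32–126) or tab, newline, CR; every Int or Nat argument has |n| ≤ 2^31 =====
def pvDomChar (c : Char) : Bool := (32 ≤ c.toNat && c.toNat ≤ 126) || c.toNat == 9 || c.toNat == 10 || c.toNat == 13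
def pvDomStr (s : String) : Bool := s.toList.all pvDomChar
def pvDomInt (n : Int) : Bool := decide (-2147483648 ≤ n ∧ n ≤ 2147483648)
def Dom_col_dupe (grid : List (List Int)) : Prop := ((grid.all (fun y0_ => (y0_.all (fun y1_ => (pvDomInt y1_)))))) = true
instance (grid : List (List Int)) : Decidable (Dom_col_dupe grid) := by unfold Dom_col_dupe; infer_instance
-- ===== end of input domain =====

-- B computes each column once and detects a duplicate by a set-cardinality comparison,
-- replacing A's incremental membership list with its break/reset inner loop (objective: simpler).

-- ===== PORT A =====
-- inner loop of A over the row indices js, carrying the `check` list; returns the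
-- contribution (0 or 1) of column i to `count` (the `break` is the 1-return)
def colDupeInner (grid : List (List Int)) (i : Nat) (js : List Nat) (check : List Int) : Int :=
  match js with
  | [] => 0
  | j :: rest =>
    let v := (grid.getD j []).getD i 0
    if v ∈ check then 1
    else colDupeInner grid i rest (check ++ [v])

def col_dupe (grid : List (List Int)) : Int :=
  let n := (grid.headD []).length
  (List.range n).foldl (fun count i => count + colDupeInner grid i (List.range n) []) 0

-- ===== PORT B =====
def col_dupe_alt (grid : List (List Int)) : Int :=
  let n := (grid.headD []).length
  (List.range n).foldl
    (fun count i =>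
      let col := (List.range n).map (fun j => (grid.getD j []).getD i 0)
      if (PySem.Set.ofList col).length ≠ col.length then count + 1 else count)
    0

-- ===== PRECONDITION & SPEC =====
-- Pre_ excludes inputs where indexing grid[j][i] (j, i < len(grid[0])) can go out of range:
-- there A raises IndexError — except for some ragged grids on which A happens to return by
-- breaking on a duplicate before reaching the short row, while B (which always builds the
-- whole column) raises IndexError; those accidental returns are excluded too.
def Pre_col_dupe (grid : List (List Int)) : Prop :=
  grid ≠ [] ∧ (grid.headD []).length ≤ grid.length ∧
    ∀ row ∈ grid.take (grid.headD []).length, (grid.headD []).length ≤ row.length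
instance (grid : List (List Int)) : Decidable (Pre_col_dupe grid) := by
  unfold Pre_col_dupe; infer_instance

def pvWitness_col_dupe : List (List Int) := [[1, 2], [1, 3]]

def Spec_col_dupe (grid : List (List Int)) (out : Int) : Prop := out = col_dupe_alt grid
instance (grid : List (List Int)) (out : Int) : Decidable (Spec_col_dupe grid out) := by
  unfold Spec_col_dupe; infer_instance

-- ===== CLAIM (what is proved, stated in full; the proofs are below) =====
def Claim_equal_col_dupe : Prop :=
  ∀ (grid : List (List Int)), Dom_col_dupe grid → Pre_col_dupe grid →
    Spec_col_dupe grid (col_dupe grid)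

-- ===== LEMMAS AND PROOFS =====

-- A's inner loop returns 1 exactly when the scanned values repeat (relative to `check`)
theorem colDupeInner_eq (grid : List (List Int)) (i : Nat) (js : List Nat)
    (check : List Int) (hnd : check.Nodup) :
    colDupeInner grid i js check =
      if (check ++ js.map (fun j => (grid.getD j []).getD i 0)).Nodup then 0 else 1 := by
  induction js generalizing check with
  | nil =>
    rw [List.map_nil, List.append_nil, if_pos hnd]
    rfl
  | cons j rest ih =>
    simp only [colDupeInner, List.map_cons]
    by_cases hv : (grid.getD j []).getD i 0 ∈ check
    · rw [if_pos hv, if_neg]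
      intro hnod
      exact (List.nodup_append.mp hnod).2.2 _ hv _ List.mem_cons_self rfl
    · have hck : (check ++ [(grid.getD j []).getD i 0]).Nodup := by
        rw [List.nodup_append]
        refine ⟨hnd, List.nodup_singleton _, ?_⟩
        intro a ha b hb e
        simp at hb
        subst hb; subst e; exact hv ha
      rw [if_neg hv, ih _ hck]
      simp only [List.append_assoc, List.singleton_append]
      rfl


theorem set_len_ne_iff (xs : List Int) :
    ((PySem.Set.ofList xs).length ≠ xs.length) ↔ ¬ xs.Nodup := by
  constructor
  · intro h hnd
    exact h (congrArg List.length (PySem.Set.ofList_eq_self_of_nodup _ hnd))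
  · intro hnd h
    have hperm : (PySem.Set.ofList xs).Perm xs.dedup := by
      rw [List.perm_ext_iff_of_nodup (PySem.Set.nodup_ofList xs) xs.nodup_dedup]
      intro a; rw [PySem.Set.mem_ofList, List.mem_dedup]
    have hlen : xs.dedup.length = xs.length := by rw [← hperm.length_eq, h]
    exact hnd (List.dedup_eq_self.mp (xs.dedup_sublist.eq_of_length hlen))

theorem foldl_step_congr (F G : Int → Nat → Int) (l : List Nat)
    (h : ∀ c, ∀ i ∈ l, F c i = G c i) :
    ∀ c : Int, l.foldl F c = l.foldl G c := by
  induction l with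
  | nil => intro c; rfl
  | cons x xs ih =>
    intro c
    simp only [List.foldl_cons, h c x (by simp)]
    exact ih (fun c i hi => h c i (by simp [hi])) _

-- ===== VERDICT (by name: the statement is the Claim_ definition above) =====
theorem col_dupe_spec : Claim_equal_col_dupe := by
  intro grid _ _
  unfold Spec_col_dupe col_dupe col_dupe_alt
  apply foldl_step_congr
  intro c i _
  rw [colDupeInner_eq grid i _ [] List.nodup_nil, List.nil_append]
  by_cases h : ((List.range (grid.headD []).length).map
      (fun j => (grid.getD j []).getD i 0)).Nodup
  · have hl := congrArg List.length (PySem.Set.ofList_eq_self_of_nodup _ h)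
    simp only [List.length_map, List.length_range] at hl
    simp only [List.getD_eq_getElem?_getD, List.headD_eq_head?_getD] at h hl ⊢
    simp [h, hl]
  · have hne := (set_len_ne_iff _).mpr h
    simp only [List.length_map, List.length_range] at hne
    simp only [List.getD_eq_getElem?_getD, List.headD_eq_head?_getD] at h hne ⊢
    simp [h, hne]
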